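-- pv_equiv track=rewrite | github.com/LordBrom/programming-challenges | usaco-training/chapter-1/combo.py | get_combos
-- ===== SOURCE A (Python) =====
-- def round_combo(num, maxNumber):
-- 	if num <= 0:
-- 		num = maxNumber + num
-- 	elif num > maxNumber:
-- 		num = (num % maxNumber)
--
-- 	if num > maxNumber:
-- 		num = maxNumber
-- 	if num <= 0:
-- 		num = 1
--
-- 	return num
--
-- def get_combos(startCombo, maxNumber):
-- 	results = []
-- 	for n1 in range(startCombo[0] - 2, startCombo[0] + 3):
-- 		for n2 in range(startCombo[1] - 2, startCombo[1] + 3):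
-- 			for n3 in range(startCombo[2] - 2, startCombo[2] + 3):
-- 				r1 = round_combo(n1, maxNumber)
-- 				r2 = round_combo(n2, maxNumber)
-- 				r3 = round_combo(n3, maxNumber)
-- 				results.append([r1, r2, r3])
-- 	return results
-- ===== SOURCE B (Python) =====
-- def _wrap(num, maxNumber):
--     if num <= 0:
--         num += maxNumber
--     elif num > maxNumber:
--         num %= maxNumber
--     return max(min(num, maxNumber), 1)
--
--
-- def get_combos(startCombo, maxNumber):
--     base = [startCombo[0] - 2, startCombo[1] - 2, startCombo[2] - 2]
--     out = []
--     for k in range(125):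
--         q, r3 = divmod(k, 5)
--         r1, r2 = divmod(q, 5)
--         out.append([_wrap(base[0] + r1, maxNumber),
--                     _wrap(base[1] + r2, maxNumber),
--                     _wrap(base[2] + r3, maxNumber)])
--     return out
-- ===== Notes on version B (the rewrite author's own statement) =====
-- stated objective: alternative
-- what changed: B replaces A's three nested neighbour loops by a single flat loop over the 125 grid indices, decoding each index into the three window offsets by base-5 divmod and rounding base+offset per axis.
import Mathlib
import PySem

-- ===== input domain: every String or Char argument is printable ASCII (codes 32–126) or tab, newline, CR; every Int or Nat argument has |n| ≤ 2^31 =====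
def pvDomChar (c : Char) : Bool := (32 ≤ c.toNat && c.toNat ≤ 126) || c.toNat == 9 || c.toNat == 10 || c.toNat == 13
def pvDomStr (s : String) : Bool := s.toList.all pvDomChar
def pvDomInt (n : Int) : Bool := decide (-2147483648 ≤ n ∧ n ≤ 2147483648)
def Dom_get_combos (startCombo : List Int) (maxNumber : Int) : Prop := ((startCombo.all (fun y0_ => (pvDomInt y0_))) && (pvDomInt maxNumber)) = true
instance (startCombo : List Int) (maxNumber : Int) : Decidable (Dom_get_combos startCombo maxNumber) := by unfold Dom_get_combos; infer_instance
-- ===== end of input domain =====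

-- B replaces the three nested neighbour loops by one flat loop over the 125 grid indices,
-- decoding each index into the three offsets by base-5 divmod (objective: alternative
-- decomposition; same asymptotic cost on this fixed 5×5×5 shape).

-- ===== PORT A =====
-- round_combo(num, maxNumber) — step-for-step port of A's helper
def round_combo (num maxNumber : Int) : Int :=
  let num := if num ≤ 0 then maxNumber + num
             else if num > maxNumber then PySem.Int.mod num maxNumber
             else num
  let num := if num > maxNumber then maxNumber else num
  let num := if num ≤ 0 then 1 else num
  num

def get_combos (startCombo : List Int) (maxNumber : Int) : List (List Int) :=
  let results : List (List Int) := []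
  (PySem.List.pyRange (PySem.List.pyGetD startCombo 0 0 - 2) (PySem.List.pyGetD startCombo 0 0 + 3) 1).foldl
    (fun results n1 =>
      (PySem.List.pyRange (PySem.List.pyGetD startCombo 1 0 - 2) (PySem.List.pyGetD startCombo 1 0 + 3) 1).foldl
        (fun results n2 =>
          (PySem.List.pyRange (PySem.List.pyGetD startCombo 2 0 - 2) (PySem.List.pyGetD startCombo 2 0 + 3) 1).foldl
            (fun results n3 =>
              let r1 := round_combo n1 maxNumber
              let r2 := round_combo n2 maxNumber
              let r3 := round_combo n3 maxNumber
              results ++ [[r1, r2, r3]])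
            results)
        results)
    results

-- ===== PORT B =====
-- _wrap(num, maxNumber) — port of B's helper
def wrap_alt (num maxNumber : Int) : Int :=
  let num := if num ≤ 0 then num + maxNumber
             else if num > maxNumber then PySem.Int.mod num maxNumber
             else num
  max (min num maxNumber) 1

-- get_combos from Source B: one flat loop over range(125), base-5 divmod decoding of the index
def get_combos_alt (startCombo : List Int) (maxNumber : Int) : List (List Int) :=
  let base : List Int :=
    [PySem.List.pyGetD startCombo 0 0 - 2, PySem.List.pyGetD startCombo 1 0 - 2,
     PySem.List.pyGetD startCombo 2 0 - 2]
  (PySem.List.pyRange 0 125 1).foldl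
    (fun out k =>
      let q := PySem.Int.floordiv k 5
      let r3 := PySem.Int.mod k 5
      let r1 := PySem.Int.floordiv q 5
      let r2 := PySem.Int.mod q 5
      out ++ [[wrap_alt (PySem.List.pyGetD base 0 0 + r1) maxNumber,
               wrap_alt (PySem.List.pyGetD base 1 0 + r2) maxNumber,
               wrap_alt (PySem.List.pyGetD base 2 0 + r3) maxNumber]])
    []

-- ===== PRECONDITION & SPEC =====
-- Pre_ excludes exactly the inputs where A raises: lists shorter than 3 (IndexError on
-- startCombo[0..2]) and maxNumber = 0 when some neighbour value is positive (ZeroDivisionError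
-- in 'num % maxNumber').
def Pre_get_combos (startCombo : List Int) (maxNumber : Int) : Prop :=
  3 ≤ startCombo.length ∧
    (maxNumber ≠ 0 ∨
      (startCombo.getD 0 0 + 2 ≤ 0 ∧ startCombo.getD 1 0 + 2 ≤ 0 ∧ startCombo.getD 2 0 + 2 ≤ 0))
instance (startCombo : List Int) (maxNumber : Int) : Decidable (Pre_get_combos startCombo maxNumber) := by
  unfold Pre_get_combos; infer_instance

def pvWitness_get_combos : List Int × Int := ([1, 5, 10], 10)

def Spec_get_combos (startCombo : List Int) (maxNumber : Int) (out : List (List Int)) : Prop := out = get_combos_alt startCombo maxNumber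
instance (startCombo : List Int) (maxNumber : Int) (out : List (List Int)) : Decidable (Spec_get_combos startCombo maxNumber out) := by unfold Spec_get_combos; infer_instance

-- ===== CLAIM (what is proved, stated in full; the proofs are below) =====
def Claim_equal_get_combos : Prop := ∀ (startCombo : List Int) (maxNumber : Int), Dom_get_combos startCombo maxNumber → Pre_get_combos startCombo maxNumber → Spec_get_combos startCombo maxNumber (get_combos startCombo maxNumber)

-- ===== LEMMAS AND PROOFS =====

-- the two rounding helpers agree on every input
theorem round_eq_wrap (num m : Int) : round_combo num m = wrap_alt num m := by
  unfold round_combo wrap_alt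
  generalize PySem.Int.mod num m = t
  simp only [max_def, min_def]
  split_ifs <;> omega

-- a ±2 neighbour range is the list of the five offsets added to its base
theorem pyRange_window (x : Int) :
    PySem.List.pyRange (x - 2) (x + 3) 1
      = ([0, 1, 2, 3, 4] : List Int).map (fun i => x - 2 + i) := by
  rw [PySem.List.pyRange_one, show (x + 3 - (x - 2)).toNat = 5 by omega]
  simp [List.range_succ]

-- base-5 decoding of the 125 grid indices enumerates the offset triples in lexicographic order
theorem decode_eq_prod :
    ((PySem.List.pyRange 0 125 1).map
        (fun k => (PySem.Int.floordiv (PySem.Int.floordiv k 5) 5,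
                   PySem.Int.mod (PySem.Int.floordiv k 5) 5,
                   PySem.Int.mod k 5)))
      = ([0, 1, 2, 3, 4] : List Int).flatMap
          (fun i => ([0, 1, 2, 3, 4] : List Int).flatMap
            (fun j => ([0, 1, 2, 3, 4] : List Int).map (fun l => (i, j, l)))) := by
  decide

-- ===== VERDICT (by name: the statement is the Claim_ definition above) =====
theorem get_combos_spec : Claim_equal_get_combos := by
  intro s m _ hpre
  obtain ⟨h3, -⟩ := hpre
  match s, h3 with
  | a :: b :: c :: t, _ =>
    show get_combos (a :: b :: c :: t) m = get_combos_alt (a :: b :: c :: t) m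
    simp only [get_combos, get_combos_alt]
    simp only [PySem.List.pyGetD_ofNat', List.getD_cons_zero, List.getD_cons_succ]
    simp only [PySem.List.foldl_append_singleton_eq_map, PySem.List.foldl_append_eq_flatMap]
    rw [pyRange_window a, pyRange_window b, pyRange_window c]
    rw [show (fun k => [wrap_alt (a - 2 + PySem.Int.floordiv (PySem.Int.floordiv k 5) 5) m,
                        wrap_alt (b - 2 + PySem.Int.mod (PySem.Int.floordiv k 5) 5) m,
                        wrap_alt (c - 2 + PySem.Int.mod k 5) m])
          = (fun (p : Int × Int × Int) =>
               [wrap_alt (a - 2 + p.1) m, wrap_alt (b - 2 + p.2.1) m, wrap_alt (c - 2 + p.2.2) m])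
            ∘ (fun k => (PySem.Int.floordiv (PySem.Int.floordiv k 5) 5,
                         PySem.Int.mod (PySem.Int.floordiv k 5) 5,
                         PySem.Int.mod k 5)) from rfl]
    rw [← List.map_map, decode_eq_prod]
    simp [round_eq_wrap]
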